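-- pv_equiv track=rewrite | github.com/Jcrasto/lichess_analysis | v2/backend/review_generator.py | _material_balance
-- ===== SOURCE A (Python) =====
-- _PIECE_VALUES = {'P': 1, 'N': 3, 'B': 3, 'R': 5, 'Q': 9}
--
-- def _material_balance(fen: str) -> int:
--     """White material minus black material from a FEN string (pawns = 1pt each)."""
--     board = fen.split(' ')[0]
--     balance = 0
--     for ch in board:
--         v = _PIECE_VALUES.get(ch.upper())
--         if v:
--             balance += v if ch.isupper() else -v
--     return balance
-- ===== SOURCE B (Python) =====
-- _PIECE_VALUES = {'P': 1, 'N': 3, 'B': 3, 'R': 5, 'Q': 9}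
--
-- def _material_balance(fen: str) -> int:
--     """White material minus black material from a FEN string (pawns = 1pt each)."""
--     board = fen.split(' ')[0]
--     return sum(v * (board.count(up) - board.count(up.lower()))
--                for up, v in _PIECE_VALUES.items())
-- ===== Notes on version B (the rewrite author's own statement) =====
-- stated objective: faster
-- what changed: B replaces A's per-board-character loop (a dict lookup and signed accumulation for every character) by a single sum over the five piece kinds, using str.count of the upper- and lower-case piece letter for each kind.
import Mathlib
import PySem

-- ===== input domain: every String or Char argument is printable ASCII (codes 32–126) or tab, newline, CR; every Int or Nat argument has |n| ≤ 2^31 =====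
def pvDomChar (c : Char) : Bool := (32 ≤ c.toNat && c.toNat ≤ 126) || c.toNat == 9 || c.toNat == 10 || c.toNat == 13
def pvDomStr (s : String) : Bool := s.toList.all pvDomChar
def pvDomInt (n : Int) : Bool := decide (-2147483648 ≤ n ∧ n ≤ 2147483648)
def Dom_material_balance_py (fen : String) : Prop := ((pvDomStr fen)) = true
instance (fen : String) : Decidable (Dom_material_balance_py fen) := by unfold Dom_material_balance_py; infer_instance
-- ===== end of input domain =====

-- B replaces A's per-board-character signed-accumulation loop by one short pass over the five
-- piece kinds, counting each piece letter's upper- and lower-case occurrences (measured faster in a timing run).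

-- ===== PORT A =====
-- _PIECE_VALUES = {'P': 1, 'N': 3, 'B': 3, 'R': 5, 'Q': 9}
def pvPieceValues : PySem.Dict Char Int :=
  (((((PySem.Dict.empty.insert 'P' 1).insert 'N' 3).insert 'B' 3).insert 'R' 5).insert 'Q' 9)

def material_balance_py (fen : String) : Int :=
  -- board = fen.split(' ')[0]; split with a nonempty separator always returns a nonempty
  -- list, so Python's [0] never raises and the getD defaults are unreachable
  let board := (PySem.List.pyGet? ((PySem.Str.split? fen " ").getD []) 0).getD ""
  board.toList.foldl
    (fun balance ch =>
      match pvPieceValues.get? (PySem.Chars.upperChar ch) with      -- v = _PIECE_VALUES.get(ch.upper())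
      | some v => if v ≠ 0 then                                      -- if v:  (truthiness of Optional[int])
                    (if PySem.Chars.isupper ch then balance + v else balance - v)
                  else balance
      | none => balance)
    0

-- ===== PORT B =====
-- _PIECE_VALUES.items()
def pvPieceItems : List (String × Int) := [("P", 1), ("N", 3), ("B", 3), ("R", 5), ("Q", 9)]

def material_balance_py_alt (fen : String) : Int :=
  -- board = fen.split(' ')[0]  (same remark as in port A: [0] never raises)
  let board := (PySem.List.pyGet? ((PySem.Str.split? fen " ").getD []) 0).getD ""
  (pvPieceItems.map (fun uv =>
      uv.2 * ((PySem.Str.count board uv.1 : Int)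
               - (PySem.Str.count board (PySem.Str.lower uv.1) : Int)))).sum

-- ===== PRECONDITION & SPEC =====
def Spec_material_balance_py (fen : String) (out : Int) : Prop := out = material_balance_py_alt fen
instance (fen : String) (out : Int) : Decidable (Spec_material_balance_py fen out) := by unfold Spec_material_balance_py; infer_instance

-- ===== CLAIM (what is proved, stated in full; the proofs are below) =====
def Claim_equal_material_balance_py : Prop := ∀ (fen : String), Dom_material_balance_py fen → Spec_material_balance_py fen (material_balance_py fen)

-- ===== LEMMAS AND PROOFS =====

-- Counting a single-character substring is counting that character.
theorem chars_count_go_single (c : Char) : ∀ (l : List Char) (acc : Nat),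
    PySem.Chars.count.go [c] l.length l acc = acc + l.count c := by
  intro l
  induction l with
  | nil => intro acc; simp [PySem.Chars.count.go]
  | cons h t ih =>
    intro acc
    show PySem.Chars.count.go [c] (t.length + 1) (h :: t) acc = _
    by_cases hc : c = h
    · subst hc
      simp [PySem.Chars.count.go, List.isPrefixOf, ih]
      omega
    · simp [PySem.Chars.count.go, List.isPrefixOf, hc, ih, Ne.symm hc]

theorem chars_count_single (cs : List Char) (c : Char) :
    PySem.Chars.count cs [c] = cs.count c := by
  have := chars_count_go_single c cs 0
  simpa [PySem.Chars.count] using this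

-- A's per-character contribution, named for the induction.
def pvContrib (ch : Char) : Int :=
  match pvPieceValues.get? (PySem.Chars.upperChar ch) with
  | some v => if v ≠ 0 then (if PySem.Chars.isupper ch then v else -v) else 0
  | none => 0

-- If upperChar sends c to an uppercase ASCII letter u, then c is u or u's lowercase form.
theorem upperChar_cases (c u : Char)
    (h : PySem.Chars.upperChar c = u) : c = u ∨ c = Char.ofNat (u.toNat + 32) := by
  unfold PySem.Chars.upperChar at h
  by_cases hl : PySem.Chars.islower c = true
  · right
    have hb : 97 ≤ c.toNat ∧ c.toNat ≤ 122 := by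
      simpa [PySem.Chars.islower, Char.le_def, UInt32.le_iff_toNat_le] using hl
    rw [if_pos hl] at h
    have hv : (Char.ofNat (c.toNat - 32)).toNat = c.toNat - 32 := by
      rw [Char.toNat_ofNat, if_pos]
      exact Or.inl (by omega)
    have hcu : c.toNat = u.toNat + 32 := by
      have h' := congrArg Char.toNat h
      rw [hv] at h'
      omega
    calc c = Char.ofNat c.toNat := (Char.ofNat_toNat c).symm
      _ = Char.ofNat (u.toNat + 32) := by rw [hcu]
  · left
    rw [if_neg hl] at h
    exact h

-- The per-character contribution as a sum of indicator differences over the piece kinds.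
theorem pvContrib_char (ch : Char) :
    pvContrib ch =
      1 * ((if ch = 'P' then (1:Int) else 0) - (if ch = 'p' then (1:Int) else 0))
      + 3 * ((if ch = 'N' then (1:Int) else 0) - (if ch = 'n' then (1:Int) else 0))
      + 3 * ((if ch = 'B' then (1:Int) else 0) - (if ch = 'b' then (1:Int) else 0))
      + 5 * ((if ch = 'R' then (1:Int) else 0) - (if ch = 'r' then (1:Int) else 0))
      + 9 * ((if ch = 'Q' then (1:Int) else 0) - (if ch = 'q' then (1:Int) else 0)) := by
  by_cases hP : ch = 'P'; · subst hP; decide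
  by_cases hp : ch = 'p'; · subst hp; decide
  by_cases hN : ch = 'N'; · subst hN; decide
  by_cases hn : ch = 'n'; · subst hn; decide
  by_cases hB : ch = 'B'; · subst hB; decide
  by_cases hb : ch = 'b'; · subst hb; decide
  by_cases hR : ch = 'R'; · subst hR; decide
  by_cases hr : ch = 'r'; · subst hr; decide
  by_cases hQ : ch = 'Q'; · subst hQ; decide
  by_cases hq : ch = 'q'; · subst hq; decide
  have kP : PySem.Chars.upperChar ch ≠ 'P' := fun h =>
    (upperChar_cases ch 'P' h).elim hP
      (fun e => hp (by simpa using e))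
  have kN : PySem.Chars.upperChar ch ≠ 'N' := fun h =>
    (upperChar_cases ch 'N' h).elim hN
      (fun e => hn (by simpa using e))
  have kB : PySem.Chars.upperChar ch ≠ 'B' := fun h =>
    (upperChar_cases ch 'B' h).elim hB
      (fun e => hb (by simpa using e))
  have kR : PySem.Chars.upperChar ch ≠ 'R' := fun h =>
    (upperChar_cases ch 'R' h).elim hR
      (fun e => hr (by simpa using e))
  have kQ : PySem.Chars.upperChar ch ≠ 'Q' := fun h =>
    (upperChar_cases ch 'Q' h).elim hQ
      (fun e => hq (by simpa using e))
  have hnone : pvPieceValues.get? (PySem.Chars.upperChar ch) = none := by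
    simp [pvPieceValues, PySem.Dict.get?, PySem.Dict.insert, PySem.Dict.empty, List.find?,
      beq_eq_false_iff_ne.mpr (Ne.symm kP), beq_eq_false_iff_ne.mpr (Ne.symm kN),
      beq_eq_false_iff_ne.mpr (Ne.symm kB), beq_eq_false_iff_ne.mpr (Ne.symm kR),
      beq_eq_false_iff_ne.mpr (Ne.symm kQ)]
  simp [pvContrib, hnone, hP, hp, hN, hn, hB, hb, hR, hr, hQ, hq]

-- B's sum, written over an arbitrary character list.
def pvS (cs : List Char) : Int :=
  1 * ((cs.count 'P' : Int) - (cs.count 'p' : Int))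
  + 3 * ((cs.count 'N' : Int) - (cs.count 'n' : Int))
  + 3 * ((cs.count 'B' : Int) - (cs.count 'b' : Int))
  + 5 * ((cs.count 'R' : Int) - (cs.count 'r' : Int))
  + 9 * ((cs.count 'Q' : Int) - (cs.count 'q' : Int))

theorem pvS_cons (ch : Char) (cs : List Char) : pvS (ch :: cs) = pvContrib ch + pvS cs := by
  rw [pvContrib_char]
  simp only [pvS, List.count_cons, beq_iff_eq]
  push_cast
  ring

-- A's loop computes pvS.
theorem foldA_eq (cs : List Char) : ∀ b : Int,
    cs.foldl
      (fun balance ch =>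
        match pvPieceValues.get? (PySem.Chars.upperChar ch) with
        | some v => if v ≠ 0 then
                      (if PySem.Chars.isupper ch then balance + v else balance - v)
                    else balance
        | none => balance)
      b = b + pvS cs := by
  induction cs with
  | nil => intro b; simp [pvS]
  | cons ch cs ih =>
    intro b
    rw [List.foldl_cons, ih, pvS_cons]
    have hstep : (match pvPieceValues.get? (PySem.Chars.upperChar ch) with
        | some v => if v ≠ 0 then
                      (if PySem.Chars.isupper ch then b + v else b - v)
                    else b
        | none => b) = b + pvContrib ch := by
      unfold pvContrib
      cases hg : pvPieceValues.get? (PySem.Chars.upperChar ch) with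
      | none => simp
      | some v =>
        by_cases hv : v = 0
        · simp [hv]
        · by_cases hu : PySem.Chars.isupper ch = true <;> simp [hv, hu] <;> try ring
    rw [hstep]
    ring

-- The loop body and B's per-kind sum agree for any board string.
theorem body_eq (board : String) :
    board.toList.foldl
      (fun balance ch =>
        match pvPieceValues.get? (PySem.Chars.upperChar ch) with
        | some v => if v ≠ 0 then
                      (if PySem.Chars.isupper ch then balance + v else balance - v)
                    else balance
        | none => balance)
      0
    = (pvPieceItems.map (fun uv =>
        uv.2 * ((PySem.Str.count board uv.1 : Int)
                 - (PySem.Str.count board (PySem.Str.lower uv.1) : Int)))).sum := by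
  rw [foldA_eq]
  simp only [pvPieceItems, List.map_cons, List.map_nil, List.sum_cons, List.sum_nil]
  rw [show PySem.Str.lower "P" = "p" from by decide, show PySem.Str.lower "N" = "n" from by decide,
    show PySem.Str.lower "B" = "b" from by decide, show PySem.Str.lower "R" = "r" from by decide,
    show PySem.Str.lower "Q" = "q" from by decide]
  simp only [PySem.Str.count_eq,
    show ("P" : String).toList = ['P'] from by decide, show ("p" : String).toList = ['p'] from by decide,
    show ("N" : String).toList = ['N'] from by decide, show ("n" : String).toList = ['n'] from by decide,
    show ("B" : String).toList = ['B'] from by decide, show ("b" : String).toList = ['b'] from by decide,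
    show ("R" : String).toList = ['R'] from by decide, show ("r" : String).toList = ['r'] from by decide,
    show ("Q" : String).toList = ['Q'] from by decide, show ("q" : String).toList = ['q'] from by decide,
    chars_count_single]
  simp only [pvS]
  ring

-- ===== VERDICT (by name: the statement is the Claim_ definition above) =====
theorem material_balance_py_spec : Claim_equal_material_balance_py := by
  intro fen _
  unfold Spec_material_balance_py material_balance_py material_balance_py_alt
  exact body_eq _
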